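-- pv_equiv track=rewrite | github.com/steinunnfridriks/ICoSC | Code/gen_sentence_examples.py | word_in_sentence
-- ===== SOURCE A (Python) =====
-- def word_in_sentence(sentence_list, word_list):
--     """Returns all sentence examples containing each word from the wordlist"""
--     all_sentences = []
--     for word in word_list:
--         each_word_example = []
--         each_word_example.append(word) # The words appear by themselves before the sentence examples
--         for sent in sentence_list:
--             if word in sent:
--                 each_word_example.append(sent)
--         all_sentences.append(each_word_example)
--     return all_sentences
-- ===== SOURCE B (Python) =====
-- def word_in_sentence(sentence_list, word_list):
--     """Returns all sentence examples containing each word from the wordlist"""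
--     # Multi-pattern dictionary scan: instead of testing `word in sent` for every
--     # (word, sentence) pair, enumerate each sentence's substrings whose length is
--     # a word length and look them up in a hash set of the words, recording per
--     # sentence the set of words it contains; then assemble the buckets from that.
--     words = set(word_list)
--     lengths = {len(w) for w in word_list}
--     matched = []
--     for sent in sentence_list:
--         n = len(sent)
--         found = set()
--         for i in range(n + 1):
--             for l in lengths:
--                 if i + l <= n:
--                     sub = sent[i:i + l]
--                     if sub in words:
--                         found.add(sub)
--         matched.append(found)
--     return [[w] + [s for s, f in zip(sentence_list, matched) if w in f]
--             for w in word_list]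
-- ===== Notes on version B (the rewrite author's own statement) =====
-- stated objective: alternative
-- what changed: B replaces A's per-(word,sentence) 'word in sent' substring tests by a multi-pattern dictionary scan: it hashes the words into a set, enumerates each sentence's substrings of the words' lengths once to compute the set of words each sentence contains, and assembles the buckets from that inverted index.
import Mathlib
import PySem

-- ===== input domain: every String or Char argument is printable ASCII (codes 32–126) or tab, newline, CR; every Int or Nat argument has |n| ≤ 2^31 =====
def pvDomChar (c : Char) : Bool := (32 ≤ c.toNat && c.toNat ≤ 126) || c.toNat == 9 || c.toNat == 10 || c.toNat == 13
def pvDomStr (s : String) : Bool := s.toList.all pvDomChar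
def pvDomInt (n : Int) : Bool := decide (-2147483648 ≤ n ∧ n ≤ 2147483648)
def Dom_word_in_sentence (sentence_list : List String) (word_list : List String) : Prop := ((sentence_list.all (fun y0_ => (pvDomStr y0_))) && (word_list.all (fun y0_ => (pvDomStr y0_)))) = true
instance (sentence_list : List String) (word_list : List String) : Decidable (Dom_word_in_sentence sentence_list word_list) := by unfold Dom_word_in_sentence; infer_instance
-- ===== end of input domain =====

-- B replaces A's per-(word,sentence) substring tests by a dictionary scan: each sentence's
-- substrings of the words' lengths are looked up in a set of the words once, and the buckets
-- are assembled from the resulting per-sentence matched sets (alternative algorithm, same results).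


-- ===== PORT A =====
def word_in_sentence (sentence_list : List String) (word_list : List String) : List (List String) :=
  word_list.foldl
    (fun all_sentences word =>
      all_sentences ++
        [sentence_list.foldl
          (fun each_word_example sent =>
            if PySem.Str.isIn word sent then each_word_example ++ [sent] else each_word_example)
          [word]])
    []

-- ===== PORT B =====
-- per-sentence inner scan: the set of words occurring in `sent` (Source B's `found` loop)
def pvFound (sent : String) (words : PySem.Set String) (lengths : PySem.Set Int) : PySem.Set String :=
  (PySem.List.pyRange 0 (PySem.Str.len sent + 1)).foldl
    (fun found i =>
      lengths.foldl
        (fun found l =>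
          if i + l ≤ PySem.Str.len sent then
            (if PySem.Set.contains words (PySem.Str.slice sent (some i) (some (i + l))) then
              PySem.Set.add found (PySem.Str.slice sent (some i) (some (i + l)))
            else found)
          else found)
        found)
    PySem.Set.empty

def word_in_sentence_alt (sentence_list : List String) (word_list : List String) : List (List String) :=
  let words := PySem.Set.ofList word_list
  let lengths : PySem.Set Int := PySem.Set.ofList (word_list.map PySem.Str.len)
  let matched := sentence_list.map (fun sent => pvFound sent words lengths)
  word_list.map (fun w =>
    [w] ++ ((sentence_list.zip matched).filter (fun p => PySem.Set.contains p.2 w)).map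
      (fun p => p.1))

-- ===== PRECONDITION & SPEC =====
def Spec_word_in_sentence (sentence_list : List String) (word_list : List String) (out : List (List String)) : Prop := out = word_in_sentence_alt sentence_list word_list
instance (sentence_list : List String) (word_list : List String) (out : List (List String)) : Decidable (Spec_word_in_sentence sentence_list word_list out) := by unfold Spec_word_in_sentence; infer_instance

-- ===== CLAIM (what is proved, stated in full; the proofs are below) =====
def Claim_equal_word_in_sentence : Prop := ∀ (sentence_list : List String) (word_list : List String), Dom_word_in_sentence sentence_list word_list → Spec_word_in_sentence sentence_list word_list (word_in_sentence sentence_list word_list)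

-- ===== LEMMAS AND PROOFS =====

lemma zip_self_map {α β : Type} (l : List α) (g : α → β) :
    l.zip (l.map g) = l.map (fun x => (x, g x)) := by
  induction l with
  | nil => rfl
  | cons x xs ih => simp [ih]

lemma mem_inner_fold (sent : String) (words : PySem.Set String) (i : Int) (L : List Int)
    (s : PySem.Set String) (x : String) :
    x ∈ L.foldl
        (fun found l =>
          if i + l ≤ PySem.Str.len sent then
            (if PySem.Set.contains words (PySem.Str.slice sent (some i) (some (i + l))) then
              PySem.Set.add found (PySem.Str.slice sent (some i) (some (i + l)))
            else found)
          else found)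
        s
    ↔ x ∈ s ∨ ∃ l ∈ L, i + l ≤ PySem.Str.len sent ∧
        PySem.Set.contains words (PySem.Str.slice sent (some i) (some (i + l))) = true ∧
        PySem.Str.slice sent (some i) (some (i + l)) = x := by
  induction L generalizing s with
  | nil => simp
  | cons l rest ih =>
    simp only [List.foldl_cons, ih]
    split_ifs with h1 h2
    · rw [PySem.Set.mem_add]
      constructor
      · rintro (⟨h | h⟩ | h)
        · exact Or.inl h
        · exact Or.inr ⟨l, by simp, h1, h2, h.symm⟩
        · obtain ⟨l', hl', h⟩ := h; exact Or.inr ⟨l', by simp [hl'], h⟩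
      · rintro (h | ⟨l', hl', h⟩)
        · exact Or.inl (Or.inl h)
        · rcases List.mem_cons.mp hl' with rfl | hl'
          · exact Or.inl (Or.inr h.2.2.symm)
          · exact Or.inr ⟨l', hl', h⟩
    · constructor
      · rintro (h | ⟨l', hl', h⟩)
        · exact Or.inl h
        · exact Or.inr ⟨l', by simp [hl'], h⟩
      · rintro (h | ⟨l', hl', h⟩)
        · exact Or.inl h
        · rcases List.mem_cons.mp hl' with rfl | hl'
          · exact absurd h.2.1 h2
          · exact Or.inr ⟨l', hl', h⟩
    · constructor
      · rintro (h | ⟨l', hl', h⟩)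
        · exact Or.inl h
        · exact Or.inr ⟨l', by simp [hl'], h⟩
      · rintro (h | ⟨l', hl', h⟩)
        · exact Or.inl h
        · rcases List.mem_cons.mp hl' with rfl | hl'
          · exact absurd h.1 h1
          · exact Or.inr ⟨l', hl', h⟩

lemma mem_pvFound (sent : String) (words : PySem.Set String) (lengths : PySem.Set Int) (x : String) :
    x ∈ pvFound sent words lengths
    ↔ ∃ i ∈ PySem.List.pyRange 0 (PySem.Str.len sent + 1), ∃ l ∈ lengths,
        i + l ≤ PySem.Str.len sent ∧
        PySem.Set.contains words (PySem.Str.slice sent (some i) (some (i + l))) = true ∧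
        PySem.Str.slice sent (some i) (some (i + l)) = x := by
  unfold pvFound
  generalize PySem.List.pyRange 0 (PySem.Str.len sent + 1) = R
  have : ∀ (s : PySem.Set String),
      x ∈ R.foldl (fun found i =>
        lengths.foldl
          (fun found l =>
            if i + l ≤ PySem.Str.len sent then
              (if PySem.Set.contains words (PySem.Str.slice sent (some i) (some (i + l))) then
                PySem.Set.add found (PySem.Str.slice sent (some i) (some (i + l)))
              else found)
            else found)
          found) s
      ↔ x ∈ s ∨ ∃ i ∈ R, ∃ l ∈ lengths,
          i + l ≤ PySem.Str.len sent ∧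
          PySem.Set.contains words (PySem.Str.slice sent (some i) (some (i + l))) = true ∧
          PySem.Str.slice sent (some i) (some (i + l)) = x := by
    induction R with
    | nil => simp
    | cons i rest ih =>
      intro s
      simp only [List.foldl_cons, ih, mem_inner_fold]
      constructor
      · rintro (⟨h | ⟨l, hl, h⟩⟩ | ⟨i', hi', h⟩)
        · exact Or.inl h
        · exact Or.inr ⟨i, by simp, l, hl, h⟩
        · exact Or.inr ⟨i', by simp [hi'], h⟩
      · rintro (h | ⟨i', hi', l, hl, h⟩)
        · exact Or.inl (Or.inl h)
        · rcases List.mem_cons.mp hi' with rfl | hi'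
          · exact Or.inl (Or.inr ⟨l, hl, h⟩)
          · exact Or.inr ⟨i', hi', l, hl, h⟩
  simpa using this PySem.Set.empty

lemma contains_iff_mem {α : Type} [BEq α] [LawfulBEq α] (s : PySem.Set α) (x : α) :
    PySem.Set.contains s x = true ↔ x ∈ s := by
  simp [PySem.Set.contains]

-- the heart of the equivalence: for a word of the list, membership in the per-sentence
-- matched set is exactly Python's `word in sent`
lemma found_eq_isIn (sent w : String) (word_list : List String) (hw : w ∈ word_list) :
    PySem.Set.contains
        (pvFound sent (PySem.Set.ofList word_list)
          (PySem.Set.ofList (word_list.map PySem.Str.len))) w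
      = PySem.Str.isIn w sent := by
  have hlen : ∀ t : String, PySem.Str.len t = (t.toList.length : Int) := by
    intro t; simp [PySem.Str.len]
  rcases hb : PySem.Str.isIn w sent with _ | _
  · -- w not in sent: w cannot be in the found set
    rw [Bool.eq_false_iff]
    intro hc
    rw [contains_iff_mem, mem_pvFound] at hc
    obtain ⟨i, hi, l, hl, hle, _, hslice⟩ := hc
    rw [PySem.List.mem_pyRange_one] at hi
    rw [PySem.Set.mem_ofList, List.mem_map] at hl
    obtain ⟨w', _, rfl⟩ := hl
    have h0i : (0:Int) ≤ i := hi.1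
    have h0b : (0:Int) ≤ i + PySem.Str.len w' := by
      rw [hlen w']; omega
    have : w.toList <+: sent.toList.drop i.toNat := by
      have := congrArg String.toList hslice
      rw [PySem.Str.toList_slice, PySem.Chars.slice_eq_listSlice,
        PySem.List.slice_toNat _ h0i h0b] at this
      rw [← this]
      exact List.take_prefix _ _
    have : PySem.Str.isIn w sent = true := by
      have h := (PySem.Chars.exists_prefix_drop_iff_isIn w.toList sent.toList).mp ⟨_, this⟩
      simpa [PySem.Str.isIn] using h
    rw [hb] at this; exact Bool.false_ne_true this
  · -- w in sent: exhibit the slice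
    rw [contains_iff_mem, mem_pvFound]
    have hinf : w.toList <:+: sent.toList := by
      rw [← PySem.Chars.isIn_iff_infix]
      simpa [PySem.Str.isIn] using hb
    obtain ⟨p, t, hp⟩ := hinf
    have hlensum : p.length + (w.toList.length + t.length) = sent.toList.length := by
      have := congrArg List.length hp
      simpa using this
    have hs : PySem.Str.slice sent (some (p.length : Int))
        (some ((p.length : Int) + PySem.Str.len w)) = w := by
      apply String.toList_inj.mp
      rw [PySem.Str.toList_slice, PySem.Chars.slice_eq_listSlice,
        PySem.List.slice_toNat _ (by positivity) (by rw [hlen]; positivity)]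
      rw [hlen]
      have h1 : (((p.length : Int) + (w.toList.length : Int)).toNat - ((p.length : Int)).toNat)
          = w.toList.length := by omega
      rw [h1, Int.toNat_natCast, ← hp, List.append_assoc, List.drop_left, List.take_left]
    refine ⟨(p.length : Int), ?_, PySem.Str.len w, ?_, ?_, ?_, hs⟩
    · rw [PySem.List.mem_pyRange_one, hlen sent]
      omega
    · rw [PySem.Set.mem_ofList, List.mem_map]; exact ⟨w, hw, rfl⟩
    · rw [hlen, hlen]; omega
    · rw [contains_iff_mem, PySem.Set.mem_ofList, hs]; exact hw

-- ===== VERDICT (by name: the statement is the Claim_ definition above) =====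
theorem word_in_sentence_spec : Claim_equal_word_in_sentence := by
  intro sentence_list word_list _
  unfold Spec_word_in_sentence word_in_sentence word_in_sentence_alt
  -- A's nested loops are map-over-words of [w] ++ filter
  rw [PySem.List.foldl_append_singleton_eq_map
    (f := fun word => sentence_list.foldl
      (fun each_word_example sent =>
        if PySem.Str.isIn word sent then each_word_example ++ [sent] else each_word_example)
      [word])]
  simp only [List.nil_append]
  apply List.map_congr_left
  intro w hw
  rw [PySem.List.foldl_append_if (p := fun sent => PySem.Str.isIn w sent) (f := fun s => s)]
  simp only [List.map_id']
  congr 1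
  -- B's zip/filter/map collapses to the same filter
  rw [zip_self_map, List.filter_map, List.map_map]
  simp only [Function.comp_def]
  rw [List.map_id']
  exact (List.filter_congr (fun s _ => by rw [found_eq_isIn s w word_list hw])).symm
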